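-- pv_equiv track=rewrite | github.com/VectorInstitute/unbias-plus | src/unbias_plus/parser.py | _deduplicate_segments
-- ===== SOURCE A (Python) =====
-- SEVERITY_RANK = {"low": 1, "medium": 2, "high": 3}
--
-- def _deduplicate_segments(segments: list[dict]) -> list[dict]:
--     """Merge duplicate segments that share the same original phrase.
--
--     When the LLM returns the same original text multiple times with
--     different bias_types, this merges them into a single segment:
--     - keeps the first replacement
--     - joins all unique bias_types with ' / '
--     - joins all unique reasonings together
--     - keeps the highest severity
--
--     Parameters
--     ----------
--     segments : list[dict]
--         Raw list of segment dicts from the parsed JSON.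
--
--     Returns
--     -------
--     list[dict]
--         Deduplicated list with one entry per unique original phrase.
--
--     """
--     seen: dict[str, dict] = {}
--     for seg in segments:
--         original = seg.get("original", "").strip()
--         if not original:
--             continue
--
--         if original not in seen:
--             seen[original] = dict(seg)
--         else:
--             merged = seen[original]
--
--             # Merge bias_type — append only if not already present
--             existing_types = {t.strip() for t in merged.get("bias_type", "").split("/")}
--             new_type = seg.get("bias_type", "").strip()
--             if new_type and new_type not in existing_types:
--                 merged["bias_type"] = merged["bias_type"].strip() + " / " + new_type
--
--             # Merge reasoning — append only if not already present
--             existing_reasoning = merged.get("reasoning", "")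
--             new_reasoning = seg.get("reasoning", "").strip()
--             if new_reasoning and new_reasoning not in existing_reasoning:
--                 merged["reasoning"] = existing_reasoning.strip() + " " + new_reasoning
--
--             # Keep highest severity
--             existing_rank = SEVERITY_RANK.get(merged.get("severity", "low").lower(), 1)
--             new_rank = SEVERITY_RANK.get(seg.get("severity", "low").lower(), 1)
--             if new_rank > existing_rank:
--                 merged["severity"] = seg["severity"]
--
--     return list(seen.values())
-- ===== SOURCE B (Python) =====
-- SEVERITY_RANK = {"low": 1, "medium": 2, "high": 3}
--
--
-- def _merge_into(acc, seg):
--     """Fold one further segment of a group into the accumulated merged dict."""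
--     t = seg.get("bias_type", "").strip()
--     if t and all(t != p.strip() for p in acc.get("bias_type", "").split("/")):
--         acc["bias_type"] = acc["bias_type"].strip() + " / " + t
--     r = seg.get("reasoning", "").strip()
--     if r and r not in acc.get("reasoning", ""):
--         acc["reasoning"] = acc.get("reasoning", "").strip() + " " + r
--     if SEVERITY_RANK.get(seg.get("severity", "low").lower(), 1) > SEVERITY_RANK.get(acc.get("severity", "low").lower(), 1):
--         acc["severity"] = seg["severity"]
--
--
-- def _deduplicate_segments(segments: list[dict]) -> list[dict]:
--     # Phase 1: group segments by their stripped original phrase (order-preserving).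
--     groups: dict[str, list] = {}
--     for seg in segments:
--         key = seg.get("original", "").strip()
--         if key:
--             groups.setdefault(key, []).append(seg)
--     # Phase 2: reduce each group by folding it with the merge rules.
--     out = []
--     for group in groups.values():
--         acc = dict(group[0])
--         for seg in group[1:]:
--             _merge_into(acc, seg)
--         out.append(acc)
--     return out
-- ===== Notes on version B (the rewrite author's own statement) =====
-- stated objective: alternative
-- what changed: Replaces A's single pass that dispatches each segment against a dict of already-merged entries with a two-phase group-then-reduce: first build an order-preserving dict mapping stripped original phrase to the list of its segments, then fold each group with the merge rules and emit the reduced values.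
import Mathlib
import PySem

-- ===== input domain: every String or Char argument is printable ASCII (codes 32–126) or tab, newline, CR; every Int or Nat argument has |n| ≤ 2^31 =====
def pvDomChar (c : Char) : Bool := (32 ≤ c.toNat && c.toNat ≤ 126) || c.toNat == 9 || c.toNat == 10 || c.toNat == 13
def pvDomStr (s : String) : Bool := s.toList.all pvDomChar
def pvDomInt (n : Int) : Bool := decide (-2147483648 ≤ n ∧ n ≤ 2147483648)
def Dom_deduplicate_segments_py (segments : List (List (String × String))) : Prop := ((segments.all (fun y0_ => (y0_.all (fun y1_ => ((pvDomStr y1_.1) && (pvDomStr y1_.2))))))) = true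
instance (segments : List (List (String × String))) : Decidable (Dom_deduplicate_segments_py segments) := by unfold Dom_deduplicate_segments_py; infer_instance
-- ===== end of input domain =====

-- B re-implements the single-pass dict-dispatch of A as a two-phase group-then-reduce
-- (first group segments by stripped original phrase, then fold each group with the merge
-- rules); equivalence of return values is proved, objective: alternative decomposition.

-- SEVERITY_RANK = {"low": 1, "medium": 2, "high": 3}  (module-level constant, shared context)
def SEVERITY_RANK : PySem.Dict String Int := PySem.Dict.mk [("low", 1), ("medium", 2), ("high", 3)]

-- ===== PORT A =====
-- literal transliteration of _deduplicate_segments: one pass building `seen`, merging in place.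
-- At `merged["bias_type"]` Python raises KeyError when that key is missing (Source B raises
-- identically at the same point, so A and B also agree there); the port reads it with
-- `getD ""`, which is exact whenever the key is present. `seg["severity"]` is only
-- reached when the key exists (its rank must exceed 1), so `getD ""` is exact there.
def deduplicate_segments_py (segments : List (List (String × String))) : List (List (String × String)) :=
  (segments.foldl
    (fun (seen : PySem.Dict String (PySem.Dict String String)) seg =>
      let segd := PySem.Dict.mk seg
      let original := PySem.Str.strip (segd.getD "original" "")
      if original = "" then seen
      else
        match seen.get? original with
        | none => seen.insert original segd
        | some merged =>
          let existing_types : PySem.Set String :=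
            PySem.Set.ofList (((PySem.Str.split? (merged.getD "bias_type" "") "/").getD []).map
              (fun t => PySem.Str.strip t))
          let new_type := PySem.Str.strip (segd.getD "bias_type" "")
          let merged :=
            if new_type ≠ "" ∧ new_type ∉ existing_types then
              merged.insert "bias_type" (PySem.Str.strip (merged.getD "bias_type" "") ++ " / " ++ new_type)
            else merged
          let existing_reasoning := merged.getD "reasoning" ""
          let new_reasoning := PySem.Str.strip (segd.getD "reasoning" "")
          let merged :=
            if new_reasoning ≠ "" ∧ PySem.Str.isIn new_reasoning existing_reasoning = false then
              merged.insert "reasoning" (PySem.Str.strip existing_reasoning ++ " " ++ new_reasoning)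
            else merged
          let existing_rank := SEVERITY_RANK.getD (PySem.Str.lower (merged.getD "severity" "low")) 1
          let new_rank := SEVERITY_RANK.getD (PySem.Str.lower (segd.getD "severity" "low")) 1
          let merged :=
            if existing_rank < new_rank then merged.insert "severity" (segd.getD "severity" "")
            else merged
          seen.insert original merged)
    PySem.Dict.empty).values.map (fun d => d.items)

-- ===== PORT B =====
-- transliteration of Source B: _merge_into folds one further group member into the accumulator
def merge_into (acc : PySem.Dict String String) (segd : PySem.Dict String String) :
    PySem.Dict String String :=
  let t := PySem.Str.strip (segd.getD "bias_type" "")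
  let acc :=
    if t ≠ "" ∧ (((PySem.Str.split? (acc.getD "bias_type" "") "/").getD []).all
        (fun p => decide (t ≠ PySem.Str.strip p))) = true then
      acc.insert "bias_type" (PySem.Str.strip (acc.getD "bias_type" "") ++ " / " ++ t)
    else acc
  let r := PySem.Str.strip (segd.getD "reasoning" "")
  let acc :=
    if r ≠ "" ∧ PySem.Str.isIn r (acc.getD "reasoning" "") = false then
      acc.insert "reasoning" (PySem.Str.strip (acc.getD "reasoning" "") ++ " " ++ r)
    else acc
  if SEVERITY_RANK.getD (PySem.Str.lower (acc.getD "severity" "low")) 1 <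
      SEVERITY_RANK.getD (PySem.Str.lower (segd.getD "severity" "low")) 1 then
    acc.insert "severity" (segd.getD "severity" "")
  else acc

-- Source B's _deduplicate_segments: group by stripped original phrase, then reduce each group
def deduplicate_segments_py_alt (segments : List (List (String × String))) :
    List (List (String × String)) :=
  let groups := segments.foldl
    (fun (g : PySem.Dict String (List (List (String × String)))) seg =>
      let key := PySem.Str.strip ((PySem.Dict.mk seg).getD "original" "")
      if key = "" then g else g.insert key (g.getD key [] ++ [seg]))
    PySem.Dict.empty
  groups.values.map (fun group =>
    match group with
    | [] => []  -- unreachable: every stored group is nonempty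
    | first :: rest =>
      (rest.foldl (fun acc seg => merge_into acc (PySem.Dict.mk seg)) (PySem.Dict.mk first)).items)

-- ===== PRECONDITION & SPEC =====
-- Pre_ excludes segment association lists that repeat a key: those do not encode a Python
-- dict (dict construction keeps the last value of a repeated key, the ports' first-match
-- lookup the first), so no Python input corresponds to them.
def Pre_deduplicate_segments_py (segments : List (List (String × String))) : Prop :=
  ∀ seg ∈ segments, (seg.map Prod.fst).Nodup
instance (segments : List (List (String × String))) :
    Decidable (Pre_deduplicate_segments_py segments) := by
  unfold Pre_deduplicate_segments_py; infer_instance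

def pvWitness_deduplicate_segments_py : (List (List (String × String))) :=
  [[("original", " age "), ("reasoning", "mentions age"), ("severity", "High")],
   [("original", "age"), ("reasoning", "ageist wording"), ("severity", "low")]]

def Spec_deduplicate_segments_py (segments : List (List (String × String))) (out : List (List (String × String))) : Prop := out = deduplicate_segments_py_alt segments
instance (segments : List (List (String × String))) (out : List (List (String × String))) : Decidable (Spec_deduplicate_segments_py segments out) := by unfold Spec_deduplicate_segments_py; infer_instance

-- ===== CLAIM (what is proved, stated in full; the proofs are below) =====
def Claim_equal_deduplicate_segments_py : Prop := ∀ (segments : List (List (String × String))), Dom_deduplicate_segments_py segments → Pre_deduplicate_segments_py segments → Spec_deduplicate_segments_py segments (deduplicate_segments_py segments)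

-- ===== LEMMAS AND PROOFS =====

-- proof-side names for the two fold bodies (definitionally the port's lambdas)
def pvMergeA (merged segd : PySem.Dict String String) : PySem.Dict String String :=
  let existing_types : PySem.Set String :=
    PySem.Set.ofList (((PySem.Str.split? (merged.getD "bias_type" "") "/").getD []).map
      (fun t => PySem.Str.strip t))
  let new_type := PySem.Str.strip (segd.getD "bias_type" "")
  let merged :=
    if new_type ≠ "" ∧ new_type ∉ existing_types then
      merged.insert "bias_type" (PySem.Str.strip (merged.getD "bias_type" "") ++ " / " ++ new_type)
    else merged
  let existing_reasoning := merged.getD "reasoning" ""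
  let new_reasoning := PySem.Str.strip (segd.getD "reasoning" "")
  let merged :=
    if new_reasoning ≠ "" ∧ PySem.Str.isIn new_reasoning existing_reasoning = false then
      merged.insert "reasoning" (PySem.Str.strip existing_reasoning ++ " " ++ new_reasoning)
    else merged
  let existing_rank := SEVERITY_RANK.getD (PySem.Str.lower (merged.getD "severity" "low")) 1
  let new_rank := SEVERITY_RANK.getD (PySem.Str.lower (segd.getD "severity" "low")) 1
  if existing_rank < new_rank then merged.insert "severity" (segd.getD "severity" "") else merged

def pvStepA (seen : PySem.Dict String (PySem.Dict String String))
    (seg : List (String × String)) : PySem.Dict String (PySem.Dict String String) :=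
  let segd := PySem.Dict.mk seg
  let original := PySem.Str.strip (segd.getD "original" "")
  if original = "" then seen
  else
    match seen.get? original with
    | none => seen.insert original segd
    | some merged => seen.insert original (pvMergeA merged segd)

def pvStepB (g : PySem.Dict String (List (List (String × String))))
    (seg : List (String × String)) : PySem.Dict String (List (List (String × String))) :=
  let key := PySem.Str.strip ((PySem.Dict.mk seg).getD "original" "")
  if key = "" then g else g.insert key (g.getD key [] ++ [seg])

lemma pvPortA_eq (segments : List (List (String × String))) :
    deduplicate_segments_py segments =
      (segments.foldl pvStepA PySem.Dict.empty).values.map (fun d => d.items) := rfl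

def pvReduce : List (List (String × String)) → PySem.Dict String String
  | [] => PySem.Dict.empty
  | f :: r => r.foldl (fun acc seg => merge_into acc (PySem.Dict.mk seg)) (PySem.Dict.mk f)

lemma pvPortB_eq (segments : List (List (String × String))) :
    deduplicate_segments_py_alt segments =
      (segments.foldl pvStepB PySem.Dict.empty).values.map (fun group =>
        match group with
        | [] => ([] : List (String × String))
        | first :: rest =>
          (rest.foldl (fun acc seg => merge_into acc (PySem.Dict.mk seg)) (PySem.Dict.mk first)).items) := rfl

lemma pvCond_iff (t : String) (parts : List String) :
    (t ≠ "" ∧ t ∉ PySem.Set.ofList (parts.map (fun p => PySem.Str.strip p))) ↔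
      (t ≠ "" ∧ (parts.all (fun p => decide (t ≠ PySem.Str.strip p))) = true) := by
  simp only [PySem.Set.mem_ofList, List.mem_map, List.all_eq_true, decide_eq_true_eq]
  constructor <;> rintro ⟨h1, h2⟩ <;> refine ⟨h1, ?_⟩
  · intro p hp hEq; exact h2 ⟨p, hp, hEq.symm⟩
  · rintro ⟨p, hp, hEq⟩; exact h2 p hp hEq.symm

lemma pvMergeA_eq (m s : PySem.Dict String String) : pvMergeA m s = merge_into m s := by
  unfold pvMergeA merge_into
  simp only [propext (pvCond_iff _ _)]

def pvMapG (g : PySem.Dict String (List (List (String × String)))) :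
    PySem.Dict String (PySem.Dict String String) :=
  PySem.Dict.mk (g.items.map (fun p => (p.1, pvReduce p.2)))

lemma pvGet?_map (l : List (String × List (List (String × String)))) (k : String) :
    (PySem.Dict.mk (l.map (fun p => (p.1, pvReduce p.2)))).get? k =
      ((PySem.Dict.mk l).get? k).map pvReduce := by
  induction l with
  | nil => rfl
  | cons p rest ih =>
    obtain ⟨pk, pv⟩ := p
    simp only [List.map_cons, PySem.Dict.get?_mk_cons]
    split_ifs with h
    · rfl
    · exact ih

lemma pvMapG_get? (g : PySem.Dict String (List (List (String × String)))) (k : String) :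
    (pvMapG g).get? k = (g.get? k).map pvReduce := by
  cases g with
  | mk l => exact pvGet?_map l k

lemma pvMapG_contains (g : PySem.Dict String (List (List (String × String)))) (k : String) :
    (pvMapG g).contains k = g.contains k := by
  rw [PySem.Dict.contains_eq_isSome_get?, PySem.Dict.contains_eq_isSome_get?, pvMapG_get?]
  cases g.get? k <;> rfl

lemma pvMapG_insert (g : PySem.Dict String (List (List (String × String)))) (k : String)
    (v : List (List (String × String))) :
    (pvMapG g).insert k (pvReduce v) = pvMapG (g.insert k v) := by
  apply PySem.Dict.ext
  show ((pvMapG g).insert k (pvReduce v)).items =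
    (g.insert k v).items.map (fun p => (p.1, pvReduce p.2))
  by_cases h : g.contains k = true
  · rw [PySem.Dict.items_insert_of_contains _ _ ((pvMapG_contains g k).trans h),
      PySem.Dict.items_insert_of_contains _ _ h]
    show (g.items.map (fun p => (p.1, pvReduce p.2))).map _ = _
    rw [List.map_map, List.map_map]
    refine List.map_congr_left (fun p _ => ?_)
    by_cases hp : (p.1 == k) = true
    · simp [Function.comp, hp]
    · simp [Function.comp, hp]
  · have h' : g.contains k = false := by simpa using h
    rw [PySem.Dict.items_insert_of_not_contains _ _ ((pvMapG_contains g k).trans h'),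
      PySem.Dict.items_insert_of_not_contains _ _ h']
    show (g.items.map (fun p => (p.1, pvReduce p.2))) ++ _ = _
    rw [List.map_append]
    rfl

lemma pvReduce_append (l : List (List (String × String))) (hl : l ≠ [])
    (s : List (String × String)) :
    pvReduce (l ++ [s]) = merge_into (pvReduce l) (PySem.Dict.mk s) := by
  cases l with
  | nil => exact absurd rfl hl
  | cons f r => simp [pvReduce, List.foldl_append]

lemma pvStep_eq (g : PySem.Dict String (List (List (String × String))))
    (hne : ∀ p ∈ g.items, p.2 ≠ []) (seg : List (String × String)) :
    pvStepA (pvMapG g) seg = pvMapG (pvStepB g seg) := by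
  simp only [pvStepA, pvStepB]
  by_cases ho : PySem.Str.strip ((PySem.Dict.mk seg).getD "original" "") = ""
  · rw [if_pos ho, if_pos ho]
  · rw [if_neg ho, if_neg ho, pvMapG_get?]
    cases h : g.get? (PySem.Str.strip ((PySem.Dict.mk seg).getD "original" "")) with
    | none =>
      simp only [Option.map_none]
      rw [PySem.Dict.getD_of_get?_eq_none _ _ h]
      have hred : PySem.Dict.mk seg = pvReduce ([] ++ [seg]) := rfl
      rw [hred, pvMapG_insert]
    | some l =>
      have hl : l ≠ [] := hne _ (PySem.Dict.mem_items_of_get?_eq_some _ h)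
      simp only [Option.map_some]
      rw [PySem.Dict.getD_of_get?_eq_some _ _ h, pvMergeA_eq,
        ← pvReduce_append l hl seg, pvMapG_insert]

lemma pvStepB_ne (g : PySem.Dict String (List (List (String × String))))
    (hne : ∀ p ∈ g.items, p.2 ≠ []) (seg : List (String × String)) :
    ∀ p ∈ (pvStepB g seg).items, p.2 ≠ [] := by
  intro p hp
  simp only [pvStepB] at hp
  split_ifs at hp with h
  · exact hne p hp
  · rcases (PySem.Dict.mem_items_insert _ _ _ _).1 hp with h1 | h2
    · subst h1; simp
    · exact hne _ h2.1

lemma pvFold_eq (segs : List (List (String × String)))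
    (g : PySem.Dict String (List (List (String × String))))
    (hne : ∀ p ∈ g.items, p.2 ≠ []) :
    segs.foldl pvStepA (pvMapG g) = pvMapG (segs.foldl pvStepB g) := by
  induction segs generalizing g with
  | nil => rfl
  | cons seg rest ih =>
    simp only [List.foldl_cons]
    rw [pvStep_eq g hne seg]
    exact ih _ (pvStepB_ne g hne seg)

lemma pvFoldB_ne (segs : List (List (String × String))) :
    ∀ p ∈ (segs.foldl pvStepB PySem.Dict.empty).items, p.2 ≠ [] := by
  have base : ∀ p ∈ (PySem.Dict.empty :
      PySem.Dict String (List (List (String × String)))).items, p.2 ≠ [] := by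
    intro p hp; cases hp
  generalize PySem.Dict.empty = g at base ⊢
  induction segs generalizing g with
  | nil => exact base
  | cons seg rest ih => exact ih _ (pvStepB_ne g base seg)

theorem pv_main (segments : List (List (String × String))) :
    deduplicate_segments_py segments = deduplicate_segments_py_alt segments := by
  rw [pvPortA_eq, pvPortB_eq]
  have hempty : (pvMapG PySem.Dict.empty) = PySem.Dict.empty := rfl
  have h := pvFold_eq segments PySem.Dict.empty (by intro p hp; cases hp)
  rw [hempty] at h
  rw [h]
  have hne := pvFoldB_ne segments
  generalize hG : segments.foldl pvStepB PySem.Dict.empty = G at hne ⊢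
  cases G with
  | mk l =>
    show (PySem.Dict.mk (l.map (fun p => (p.1, pvReduce p.2)))).values.map _ = _
    rw [PySem.Dict.values_mk, PySem.Dict.values_mk]
    simp only [List.map_map]
    refine List.map_congr_left (fun p hp => ?_)
    have hnil : p.2 ≠ [] := hne p hp
    cases hq : p.2 with
    | nil => exact absurd hq hnil
    | cons f r => simp [Function.comp, hq, pvReduce]

-- ===== VERDICT (by name: the statement is the Claim_ definition above) =====
theorem deduplicate_segments_py_spec : Claim_equal_deduplicate_segments_py := by
  intro segments _ _
  unfold Spec_deduplicate_segments_py
  exact pv_main segments
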